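-- pv_equiv track=rewrite | github.com/TraceofLight/BOJ_solved | 백준/Gold/10942. 팰린드롬？/팰린드롬？.py | check_pelindrome
-- ===== SOURCE A (Python) =====
-- def check_pelindrome(target_list: list, result_list: list, start: int, end: int) -> int:
--     '''
--     임의의 배열의 시작점과 끝점이 주어졌을 때 펠린드롬인지 아닌지 확인하는 함수
--     '''
--
--     # 값이 이미 존재하는 경우 조사하지 않음
--     if result_list[start][end] is None:
--
--         # 배열 길이가 1인 경우 무조건 펠린드롬
--         if start == end:
--             result_list[start][start] = 1
--             result = 1
--
--         # 배열 범위가 2인 경우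
--         elif start + 1 == end:
--
--             # 두 수가 같다면 펠린드롬
--             if target_list[start] == target_list[end]:
--                 result_list[start][end] = 1
--                 result = 1
--
--             # 다르다면 펠린드롬이 아님
--             else:
--                 result_list[start][end] = 0
--                 result = 0
--
--         # 배열 범위가 2 이상인 경우
--         else:
--
--             # 앞뒤로 1칸씩 줄인 범위에 대해 조사
--             last_result = check_pelindrome(target_list, result_list, start + 1, end - 1)
--
--             # 해당 범위가 펠린드롬이 아니라면 당연히 펠린드롬이 아님
--             if not last_result:
--                 result_list[start][end] = 0
--                 result = 0
--
--             # 해당 범위에 대해 펠린드롬일 경우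
--             else:
--
--                 # 맨 앞과 맨 뒤가 같다면 펠린드롬
--                 if target_list[start] == target_list[end]:
--                     result_list[start][end] = 1
--                     result = 1
--
--                 # 다르다면 펠린드롬이 아님
--                 else:
--                     result_list[start][end] = 0
--                     result = 0
--
--     # None이 아니라면 기존에 입력된 값을 반환
--     else:
--         result = result_list[start][end]
--
--     # 결과를 반환
--     return result
-- ===== SOURCE B (Python) =====
-- def check_pelindrome(target_list: list, result_list: list, start: int, end: int) -> int:
--     '''
--     Iterative re-implementation: walk inward to the first memoized or base
--     interval, then combine outward in closed form.  Unlike A it does not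
--     write memo entries into result_list (return value only).
--     '''
--     # walk inward until the first memoized cell or a base interval
--     d = 0
--     while (result_list[start + d][end - d] is None
--            and start + d != end - d and start + d + 1 != end - d):
--         d += 1
--     s, e = start + d, end - d
--
--     # value of the innermost (stopping) interval
--     m = result_list[s][e]
--     if m is not None:
--         v = m
--     elif s == e:
--         v = 1
--     else:
--         v = 1 if target_list[s] == target_list[e] else 0
--
--     if d == 0:
--         return v
--     # outward combination: palindrome iff inner value truthy and all outer pairs match
--     if v == 0 or any(target_list[start + i] != target_list[end - i] for i in range(d)):
--         return 0
--     return 1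
-- ===== Notes on version B (the rewrite author's own statement) =====
-- stated objective: alternative
-- what changed: A's memoized recursion is replaced by an explicit iterative inward scan to the first memoized or base interval plus a closed-form outward combination (no recursion and no memo writes; the equivalence is about the return value only - B does not mutate result_list).
import Mathlib
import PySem

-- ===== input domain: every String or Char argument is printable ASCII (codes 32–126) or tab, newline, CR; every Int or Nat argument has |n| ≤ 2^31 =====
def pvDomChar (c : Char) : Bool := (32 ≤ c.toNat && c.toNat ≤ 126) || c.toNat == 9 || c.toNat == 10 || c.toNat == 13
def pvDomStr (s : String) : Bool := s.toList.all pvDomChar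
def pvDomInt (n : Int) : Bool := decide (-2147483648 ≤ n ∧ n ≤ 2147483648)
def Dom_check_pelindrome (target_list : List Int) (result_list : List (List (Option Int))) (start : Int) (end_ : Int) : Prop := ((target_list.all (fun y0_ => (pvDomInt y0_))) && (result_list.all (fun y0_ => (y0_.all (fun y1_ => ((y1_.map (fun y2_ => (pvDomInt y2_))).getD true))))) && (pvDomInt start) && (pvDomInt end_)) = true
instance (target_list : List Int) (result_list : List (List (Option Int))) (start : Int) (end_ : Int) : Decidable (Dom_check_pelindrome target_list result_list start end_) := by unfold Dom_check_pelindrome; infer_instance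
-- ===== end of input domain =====

-- B replaces A's memoized recursion by an iterative inward scan plus a closed-form outward
-- combination; A mutates result_list (memo writes), B does not — the equivalence proved here
-- is about the RETURN value only.

-- ===== PORT A =====
-- fuel-based transliteration of A's recursion; `none` marks an IndexError / fuel exhaustion
-- (unreachable inside Pre_); the memo writes do not influence A's return value (each interval
-- is visited once), so the port reads the table immutably.
def pvAgo (tl : List Int) (rl : List (List (Option Int))) (s e : Int) : Nat → Option Int
  | 0 => none
  | fuel+1 =>
    match PySem.List.pyGet? rl s with
    | none => none
    | some row =>
      match PySem.List.pyGet? row e with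
      | none => none
      | some (some v) => some v          -- memo hit: return stored value
      | some none =>
        if s = e then some 1
        else if s + 1 = e then
          match PySem.List.pyGet? tl s, PySem.List.pyGet? tl e with
          | some a, some b => some (if a = b then 1 else 0)
          | _, _ => none
        else
          match pvAgo tl rl (s+1) (e-1) fuel with
          | none => none
          | some last =>
            if last = 0 then some 0
            else
              match PySem.List.pyGet? tl s, PySem.List.pyGet? tl e with
              | some a, some b => some (if a = b then 1 else 0)
              | _, _ => none

def check_pelindrome (target_list : List Int) (result_list : List (List (Option Int))) (start : Int) (end_ : Int) : Int :=
  (pvAgo target_list result_list start end_ ((end_ - start).toNat + 1)).getD 0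

-- ===== PORT B =====
-- the `while` loop of Source B: walk inward until the first memoized cell or base interval
def pvBfind (rl : List (List (Option Int))) (start end_ : Int) : Nat → Nat → Option Nat
  | _, 0 => none
  | d, fuel+1 =>
    match PySem.List.pyGet? rl (start + (d : Int)) with
    | none => none
    | some row =>
      match PySem.List.pyGet? row (end_ - (d : Int)) with
      | none => none
      | some (some _) => some d
      | some none =>
        if start + (d : Int) = end_ - (d : Int) ∨ start + (d : Int) + 1 = end_ - (d : Int)
        then some d
        else pvBfind rl start end_ (d+1) fuel

-- the `any(... for i in range(d))` of Source B, short-circuiting left to right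
def pvBany (tl : List Int) (start end_ : Int) : List Nat → Option Bool
  | [] => some false
  | i :: rest =>
    match PySem.List.pyGet? tl (start + (i : Int)), PySem.List.pyGet? tl (end_ - (i : Int)) with
    | some a, some b => if a ≠ b then some true else pvBany tl start end_ rest
    | _, _ => none

def check_pelindrome_alt (target_list : List Int) (result_list : List (List (Option Int))) (start : Int) (end_ : Int) : Int :=
  match pvBfind result_list start end_ 0 ((end_ - start).toNat + 1) with
  | none => 0
  | some d =>
    let s := start + (d : Int)
    let e := end_ - (d : Int)
    match PySem.List.pyGet? result_list s with
    | none => 0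
    | some row =>
      match PySem.List.pyGet? row e with
      | none => 0
      | some m =>
        let v : Int :=
          match m with
          | some mv => mv
          | none =>
            if s = e then 1
            else
              match PySem.List.pyGet? target_list s, PySem.List.pyGet? target_list e with
              | some a, some b => if a = b then 1 else 0
              | _, _ => 0
        if d = 0 then v
        else if v = 0 then 0
        else
          match pvBany target_list start end_ (List.range d) with
          | some true => 0
          | some false => 1
          | none => 0

-- ===== PRECONDITION & SPEC =====
-- the memo cell result_list[i][j] under Python indexing (none = IndexError)
def pvPeek (result_list : List (List (Option Int))) (i j : Int) : Option (Option Int) :=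
  match PySem.List.pyGet? result_list i with
  | none => none
  | some row => PySem.List.pyGet? row j

-- Pre_ admits the proper intervals 0 ≤ start ≤ end < len over a big-enough memo table (first
-- disjunct) and every input on which A stops at once (memo hit, start == end, or the in-range
-- two-element base case, any index sign).  It excludes the inputs on which A's inward
-- recursion reaches an out-of-range index and raises IndexError, and the inputs whose deeper
-- recursion only survives through Python's accidental negative-index wraparound (A returns
-- there and B matches it, but the corner is an artefact nobody would specify).
def Pre_check_pelindrome (target_list : List Int) (result_list : List (List (Option Int))) (start : Int) (end_ : Int) : Prop :=
  (0 ≤ start ∧ start ≤ end_ ∧ end_ < (target_list.length : Int) ∧ end_ < (result_list.length : Int) ∧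
   ∀ i ∈ List.range result_list.length, start ≤ (i : Int) → (i : Int) ≤ end_ →
     end_ < ((result_list.getD i []).length : Int)) ∨
  (pvPeek result_list start end_ ≠ none ∧
   (pvPeek result_list start end_ ≠ some none ∨ start = end_ ∨
    (start + 1 = end_ ∧ -(target_list.length : Int) ≤ start ∧ start < (target_list.length : Int) ∧
     -(target_list.length : Int) ≤ end_ ∧ end_ < (target_list.length : Int))))

instance (target_list : List Int) (result_list : List (List (Option Int))) (start : Int) (end_ : Int) : Decidable (Pre_check_pelindrome target_list result_list start end_) := by unfold Pre_check_pelindrome; infer_instance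

def pvWitness_check_pelindrome : List Int × List (List (Option Int)) × Int × Int :=
  ([1, 2, 1], [[none, none, none], [none, none, none], [none, none, none]], 0, 2)

def Spec_check_pelindrome (target_list : List Int) (result_list : List (List (Option Int))) (start : Int) (end_ : Int) (out : Int) : Prop := out = check_pelindrome_alt target_list result_list start end_
instance (target_list : List Int) (result_list : List (List (Option Int))) (start : Int) (end_ : Int) (out : Int) : Decidable (Spec_check_pelindrome target_list result_list start end_ out) := by unfold Spec_check_pelindrome; infer_instance

-- ===== CLAIM (what is proved, stated in full; the proofs are below) =====
def Claim_equal_check_pelindrome : Prop := ∀ (target_list : List Int) (result_list : List (List (Option Int))) (start : Int) (end_ : Int), Dom_check_pelindrome target_list result_list start end_ → Pre_check_pelindrome target_list result_list start end_ → Spec_check_pelindrome target_list result_list start end_ (check_pelindrome target_list result_list start end_)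

-- ===== LEMMAS AND PROOFS =====

-- fuel monotonicity of the inward scan
lemma pvBfind_succ (rl : List (List (Option Int))) (a b : Int) :
    ∀ f d d', pvBfind rl a b d f = some d' → pvBfind rl a b d (f+1) = some d' := by
  intro f
  induction f with
  | zero => intro d d' h; simp [pvBfind] at h
  | succ f ih =>
    intro d d' h
    rw [pvBfind] at h ⊢
    rcases hr : PySem.List.pyGet? rl (a + (d : Int)) with _ | row <;> simp [hr] at h ⊢
    rcases hc : PySem.List.pyGet? row (b - (d : Int)) with _ | (_ | v) <;> simp [hc] at h ⊢
    · by_cases hb : a + (d : Int) = b - (d : Int) ∨ a + (d : Int) + 1 = b - (d : Int)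
      · simp [hb] at h ⊢; exact h
      · simp [hb] at h ⊢; exact ih _ _ h
    · exact h

lemma pvBfind_mono (rl : List (List (Option Int))) (a b : Int) :
    ∀ f g d d', f ≤ g → pvBfind rl a b d f = some d' → pvBfind rl a b d g = some d' := by
  intro f g d d' hfg h
  induction hfg with
  | refl => exact h
  | step _ ih => exact pvBfind_succ rl a b _ d d' ih

-- getD form of a successful Python lookup
lemma pvGet_getD {α : Type} (xs : List α) (i : Int) (d : α) (h0 : 0 ≤ i)
    (h1 : i < (xs.length : Int)) : PySem.List.pyGet? xs i = some (xs.getD i.toNat d) := by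
  rw [PySem.List.pyGet?_eq_some_getElem xs h0 h1]
  exact congrArg some (List.getD_eq_getElem (l := xs) (d := d) (n := i.toNat) (by omega)).symm

-- shifting the scan one step inward
lemma pvBfind_shift (rl : List (List (Option Int))) (a b : Int) :
    ∀ f d, pvBfind rl a b (d+1) f = (pvBfind rl (a+1) (b-1) d f).map (· + 1) := by
  intro f
  induction f with
  | zero => intro d; simp [pvBfind]
  | succ f ih =>
    intro d
    rw [pvBfind, pvBfind]
    have h1 : a + ((d+1 : Nat) : Int) = (a+1) + (d : Int) := by push_cast; ring
    have h2 : b - ((d+1 : Nat) : Int) = (b-1) - (d : Int) := by push_cast; ring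
    rw [h1, h2]
    rcases hrw : PySem.List.pyGet? rl ((a+1) + (d : Int)) with _ | row <;> simp only []
    · simp
    · rcases hc : PySem.List.pyGet? row ((b-1) - (d : Int)) with _ | (_ | v) <;> simp only []
      · simp
      · by_cases hb : (a+1) + (d : Int) = (b-1) - (d : Int) ∨ (a+1) + (d : Int) + 1 = (b-1) - (d : Int)
        · simp [hb]
        · simp only [if_neg hb]
          exact ih (d+1)
      · simp

-- if the scanned window is inside the table, the scan terminates with a value
lemma pvBfind_ex (rl : List (List (Option Int))) :
    ∀ fuel (s e : Int), 0 ≤ s → s ≤ e → e < (rl.length : Int) →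
      (∀ i : Nat, s ≤ (i : Int) → (i : Int) ≤ e → e < ((rl.getD i []).length : Int)) →
      (e - s).toNat < fuel → ∃ d', pvBfind rl s e 0 fuel = some d' := by
  intro fuel
  induction fuel with
  | zero => intro s e _ _ _ _ hf; omega
  | succ f ih =>
    intro s e h0 hse hr hrow hf
    have hrowlen := hrow s.toNat (by omega) (by omega)
    rw [pvBfind]
    simp only [Nat.cast_zero, add_zero, sub_zero,
      pvGet_getD rl s [] h0 (by omega),
      pvGet_getD (rl.getD s.toNat []) e none (by omega) (by omega)]
    rcases hc : (rl.getD s.toNat []).getD e.toNat none with _ | v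
    · by_cases hb : s = e ∨ s + 1 = e
      · simp [hb]
      · simp only [if_neg hb]
        have : (0 : Nat) + 1 = 1 := rfl
        rw [show (1 : Nat) = 0 + 1 from rfl, pvBfind_shift]
        obtain ⟨d', hd'⟩ := ih (s+1) (e-1) (by omega) (by omega) (by omega)
          (fun i hi1 hi2 => by have := hrow i (by omega) (by omega); omega) (by omega)
        exact ⟨d' + 1, by rw [hd']; rfl⟩
    · exact ⟨0, by simp⟩

-- invariant of the scan: the stopping pair is still an interval, all skipped pairs were wide
lemma pvBfind_inv (rl : List (List (Option Int))) (a b : Int) :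
    ∀ f (d0 d : Nat), a + (d0 : Int) ≤ b - (d0 : Int) → pvBfind rl a b d0 f = some d →
      d0 ≤ d ∧ a + (d : Int) ≤ b - (d : Int) ∧
      ∀ i : Nat, d0 ≤ i → i < d → a + (i : Int) + 1 < b - (i : Int) := by
  intro f
  induction f with
  | zero => intro d0 d _ h; simp [pvBfind] at h
  | succ f ih =>
    intro d0 d hle h
    rw [pvBfind] at h
    rcases hrw : PySem.List.pyGet? rl (a + (d0 : Int)) with _ | row <;> simp only [hrw] at h
    · simp at h
    · rcases hc : PySem.List.pyGet? row (b - (d0 : Int)) with _ | (_ | v) <;> simp only [hc] at h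
      · simp at h
      · by_cases hb : a + (d0 : Int) = b - (d0 : Int) ∨ a + (d0 : Int) + 1 = b - (d0 : Int)
        · simp only [if_pos hb, Option.some.injEq] at h
          subst h
          exact ⟨le_refl _, hle, fun i h1 h2 => by omega⟩
        · simp only [if_neg hb] at h
          push Not at hb
          have hlt : a + (d0 : Int) + 1 < b - (d0 : Int) := by omega
          obtain ⟨h1, h2, h3⟩ := ih (d0+1) d (by push_cast; omega) h
          refine ⟨by omega, h2, fun i hi1 hi2 => ?_⟩
          by_cases hi : i = d0
          · subst hi; exact hlt
          · exact h3 i (by omega) hi2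
      · simp only [Option.some.injEq] at h
        subst h
        exact ⟨le_refl _, hle, fun i h1 h2 => by omega⟩

-- characterization of pvBany on in-range index lists
lemma pvBany_char (tl : List Int) (s e : Int) :
    ∀ l : List Nat,
      (∀ i ∈ l, 0 ≤ s + (i : Int) ∧ s + (i : Int) < (tl.length : Int) ∧
                 0 ≤ e - (i : Int) ∧ e - (i : Int) < (tl.length : Int)) →
      pvBany tl s e l =
        some (l.any fun i => !(tl.getD (s + (i : Int)).toNat 0 == tl.getD (e - (i : Int)).toNat 0)) := by
  intro l
  induction l with
  | nil => intro _; simp [pvBany]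
  | cons i rest ih =>
    intro hin
    obtain ⟨hi1, hi2, hi3, hi4⟩ := hin i (by simp)
    simp only [pvBany, pvGet_getD tl (s + (i : Int)) 0 hi1 hi2, pvGet_getD tl (e - (i : Int)) 0 hi3 hi4]
    by_cases hv : tl.getD (s + (i : Int)).toNat 0 = tl.getD (e - (i : Int)).toNat 0
    · rw [if_neg (not_not_intro hv), ih (fun j hj => hin j (List.mem_cons_of_mem _ hj))]
      congr 1
      rw [List.any_cons,
        show (!(tl.getD (s + (i : Int)).toNat 0 == tl.getD (e - (i : Int)).toNat 0)) = false from by rw [Bool.not_eq_false', beq_iff_eq]; exact hv,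
        Bool.false_or]
    · rw [if_pos hv]
      congr 1
      rw [List.any_cons,
        show (!(tl.getD (s + (i : Int)).toNat 0 == tl.getD (e - (i : Int)).toNat 0)) = true from by rw [Bool.not_eq_true', beq_eq_false_iff_ne]; exact hv,
        Bool.true_or]

-- the main step lemma on the B side: with no memo at (s,e) and gap ≥ 2, B's value satisfies
-- A's recurrence
set_option maxHeartbeats 2000000 in
lemma alt_step (tl : List Int) (rl : List (List (Option Int))) (s e : Int)
    (h0 : 0 ≤ s) (hse : s + 2 ≤ e) (ht : e < (tl.length : Int)) (hr : e < (rl.length : Int))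
    (hrow : ∀ i : Nat, s ≤ (i : Int) → (i : Int) ≤ e → e < ((rl.getD i []).length : Int))
    (hcell : (rl.getD s.toNat []).getD e.toNat none = none) :
    check_pelindrome_alt tl rl s e =
      if check_pelindrome_alt tl rl (s+1) (e-1) = 0 then 0
      else if tl.getD s.toNat 0 = tl.getD e.toNat 0 then 1 else 0 := by
  have hrow0 := hrow s.toNat (by omega) (by omega)
  obtain ⟨d', hd'⟩ := pvBfind_ex rl (((e-1) - (s+1)).toNat + 1) (s+1) (e-1) (by omega) (by omega)
    (by omega) (fun i hi1 hi2 => by have := hrow i (by omega) (by omega); omega) (by omega)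
  have hd2 : pvBfind rl (s+1) (e-1) 0 (e - s).toNat = some d' :=
    pvBfind_mono rl (s+1) (e-1) _ _ 0 d' (by omega) hd'
  obtain ⟨-, hmid, hwide⟩ := pvBfind_inv rl (s+1) (e-1) _ 0 d' (by simp; omega) hd'
  have hfind : pvBfind rl s e 0 ((e - s).toNat + 1) = some (d' + 1) := by
    rw [pvBfind]
    simp only [Nat.cast_zero, add_zero, sub_zero,
      pvGet_getD rl s [] h0 (by omega),
      pvGet_getD (rl.getD s.toNat []) e none (by omega) (by omega), hcell]
    rw [if_neg (by omega), pvBfind_shift, hd2]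
    rfl
  have hS : s + ((d' + 1 : Nat) : Int) = (s + 1) + (d' : Int) := by push_cast; ring
  have hE : e - ((d' + 1 : Nat) : Int) = (e - 1) - (d' : Int) := by push_cast; ring
  have hrowS := hrow ((s + 1) + (d' : Int)).toNat (by omega) (by omega)
  have hgetrow : PySem.List.pyGet? rl ((s + 1) + (d' : Int)) =
      some (rl.getD ((s + 1) + (d' : Int)).toNat []) := pvGet_getD rl _ [] (by omega) (by omega)
  have hgetcell : PySem.List.pyGet? (rl.getD ((s + 1) + (d' : Int)).toNat []) ((e - 1) - (d' : Int)) =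
      some ((rl.getD ((s + 1) + (d' : Int)).toNat []).getD ((e - 1) - (d' : Int)).toNat none) :=
    pvGet_getD _ _ none (by omega) (by omega)
  have hgtS : PySem.List.pyGet? tl ((s + 1) + (d' : Int)) =
      some (tl.getD ((s + 1) + (d' : Int)).toNat 0) := pvGet_getD tl _ 0 (by omega) (by omega)
  have hgtE : PySem.List.pyGet? tl ((e - 1) - (d' : Int)) =
      some (tl.getD ((e - 1) - (d' : Int)).toNat 0) := pvGet_getD tl _ 0 (by omega) (by omega)
  have hbO : pvBany tl s e (List.range (d' + 1)) =
      some ((List.range (d' + 1)).any fun i =>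
        !(tl.getD (s + (i : Int)).toNat 0 == tl.getD (e - (i : Int)).toNat 0)) :=
    pvBany_char tl s e _ (fun i hi => by
      have hi' := List.mem_range.mp hi
      refine ⟨by omega, by omega, by omega, by omega⟩)
  have hbI : pvBany tl (s+1) (e-1) (List.range d') =
      some ((List.range d').any fun i =>
        !(tl.getD ((s+1) + (i : Int)).toNat 0 == tl.getD ((e-1) - (i : Int)).toNat 0)) :=
    pvBany_char tl (s+1) (e-1) _ (fun i hi => by
      have hi' := List.mem_range.mp hi
      have := hwide i (by omega) hi'
      refine ⟨by omega, by omega, by omega, by omega⟩)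
  have hsplit : ((List.range (d' + 1)).any fun i =>
        !(tl.getD (s + (i : Int)).toNat 0 == tl.getD (e - (i : Int)).toNat 0)) =
      ((!(tl.getD s.toNat 0 == tl.getD e.toNat 0)) ||
        (List.range d').any fun i =>
          !(tl.getD ((s+1) + (i : Int)).toNat 0 == tl.getD ((e-1) - (i : Int)).toNat 0)) := by
    rw [List.range_succ_eq_map, List.any_cons, List.any_map]
    congr 1
    · simp
    · congr 1
      funext i
      simp only [Function.comp]
      rw [show s + ((i + 1 : Nat) : Int) = (s+1) + (i : Int) from by push_cast; ring,
          show e - ((i + 1 : Nat) : Int) = (e-1) - (i : Int) from by push_cast; ring]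
  unfold check_pelindrome_alt
  simp only [hfind, hd', hS, hE, hgetrow, hgetcell, hgtS, hgtE, hbO, hbI, hsplit]
  clear hfind hd2 hd' hbO hbI hsplit hgetrow hgetcell hgtS hgtE hrowS hmid hwide hS hE
  clear hrow hcell hrow0 h0 hse ht hr
  rcases hm : (rl.getD ((s + 1) + (d' : Int)).toNat []).getD ((e - 1) - (d' : Int)).toNat none
      with _ | mv <;>
    by_cases hd0 : d' = 0 <;>
    by_cases heq : tl.getD s.toNat 0 = tl.getD e.toNat 0 <;>
    by_cases hSE0 : (s + 1) + (d' : Int) = (e - 1) - (d' : Int) <;>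
    by_cases hcmp : tl.getD ((s + 1) + (d' : Int)).toNat 0 = tl.getD ((e - 1) - (d' : Int)).toNat 0 <;>
    cases hany : ((List.range d').any fun i =>
        !(tl.getD ((s+1) + (i : Int)).toNat 0 == tl.getD ((e-1) - (i : Int)).toNat 0)) <;>
    simp_all [beq_eq_decide]

-- the three stopping cases of B
lemma alt_memo (tl : List Int) (rl : List (List (Option Int))) (s e : Int) (v : Int)
    (h0 : 0 ≤ s) (hse : s ≤ e) (hr : e < (rl.length : Int))
    (hrow : e < (((rl.getD s.toNat [])).length : Int))
    (hcell : (rl.getD s.toNat []).getD e.toNat none = some v) :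
    check_pelindrome_alt tl rl s e = v := by
  unfold check_pelindrome_alt
  have hfind : pvBfind rl s e 0 ((e - s).toNat + 1) = some 0 := by
    rw [pvBfind]
    simp only [Nat.cast_zero, add_zero, sub_zero,
      pvGet_getD rl s [] h0 (by omega),
      pvGet_getD (rl.getD s.toNat []) e none (by omega) (by omega), hcell]
  simp only [hfind, Nat.cast_zero, add_zero, sub_zero,
    pvGet_getD rl s [] h0 (by omega),
    pvGet_getD (rl.getD s.toNat []) e none (by omega) (by omega), hcell]
  simp

lemma alt_single (tl : List Int) (rl : List (List (Option Int))) (s : Int)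
    (h0 : 0 ≤ s) (hr : s < (rl.length : Int))
    (hrow : s < (((rl.getD s.toNat [])).length : Int))
    (hcell : (rl.getD s.toNat []).getD s.toNat none = none) :
    check_pelindrome_alt tl rl s s = 1 := by
  unfold check_pelindrome_alt
  have hfind : pvBfind rl s s 0 ((s - s).toNat + 1) = some 0 := by
    rw [pvBfind]
    simp only [Nat.cast_zero, add_zero, sub_zero,
      pvGet_getD rl s [] h0 (by omega),
      pvGet_getD (rl.getD s.toNat []) s none (by omega) (by omega), hcell]
    simp
  simp only [hfind, Nat.cast_zero, add_zero, sub_zero,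
    pvGet_getD rl s [] h0 (by omega),
    pvGet_getD (rl.getD s.toNat []) s none (by omega) (by omega), hcell]
  simp

lemma alt_double (tl : List Int) (rl : List (List (Option Int))) (s : Int)
    (h0 : 0 ≤ s) (ht : s + 1 < (tl.length : Int)) (hr : s + 1 < (rl.length : Int))
    (hrow : s + 1 < (((rl.getD s.toNat [])).length : Int))
    (hcell : (rl.getD s.toNat []).getD (s+1).toNat none = none) :
    check_pelindrome_alt tl rl s (s+1) =
      if tl.getD s.toNat 0 = tl.getD (s+1).toNat 0 then 1 else 0 := by
  unfold check_pelindrome_alt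
  have hfind : pvBfind rl s (s+1) 0 ((s + 1 - s).toNat + 1) = some 0 := by
    rw [pvBfind]
    simp only [Nat.cast_zero, add_zero, sub_zero,
      pvGet_getD rl s [] h0 (by omega),
      pvGet_getD (rl.getD s.toNat []) (s+1) none (by omega) (by omega), hcell]
    simp
  simp only [hfind, Nat.cast_zero, add_zero, sub_zero,
    pvGet_getD rl s [] h0 (by omega),
    pvGet_getD (rl.getD s.toNat []) (s+1) none (by omega) (by omega), hcell,
    pvGet_getD tl s 0 h0 (by omega), pvGet_getD tl (s+1) 0 (by omega) ht]
  simp [show ¬ (s = s + 1) from by omega]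

-- the three immediate-stop cases, for arbitrary (possibly negative) indices
lemma stop_memo (tl : List Int) (rl : List (List (Option Int))) (s e : Int)
    (row : List (Option Int)) (v : Int)
    (hrw : PySem.List.pyGet? rl s = some row) (hc : PySem.List.pyGet? row e = some (some v)) :
    check_pelindrome tl rl s e = check_pelindrome_alt tl rl s e := by
  have hfind : pvBfind rl s e 0 ((e - s).toNat + 1) = some 0 := by
    rw [pvBfind]
    simp only [Nat.cast_zero, add_zero, sub_zero, hrw, hc]
  unfold check_pelindrome check_pelindrome_alt
  rw [pvAgo]
  simp only [hfind, Nat.cast_zero, add_zero, sub_zero, hrw, hc]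
  simp

lemma stop_single (tl : List Int) (rl : List (List (Option Int))) (s : Int)
    (row : List (Option Int))
    (hrw : PySem.List.pyGet? rl s = some row) (hc : PySem.List.pyGet? row s = some none) :
    check_pelindrome tl rl s s = check_pelindrome_alt tl rl s s := by
  have hfind : pvBfind rl s s 0 ((s - s).toNat + 1) = some 0 := by
    rw [pvBfind]
    simp only [Nat.cast_zero, add_zero, sub_zero, hrw, hc]
    simp
  unfold check_pelindrome check_pelindrome_alt
  rw [pvAgo]
  simp only [hfind, Nat.cast_zero, add_zero, sub_zero, hrw, hc]
  simp

lemma stop_double (tl : List Int) (rl : List (List (Option Int))) (s e : Int)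
    (row : List (Option Int)) (a b : Int) (hs1 : s + 1 = e)
    (hrw : PySem.List.pyGet? rl s = some row) (hc : PySem.List.pyGet? row e = some none)
    (hta : PySem.List.pyGet? tl s = some a) (htb : PySem.List.pyGet? tl e = some b) :
    check_pelindrome tl rl s e = check_pelindrome_alt tl rl s e := by
  have hne : ¬ s = e := by omega
  have hfind : pvBfind rl s e 0 ((e - s).toNat + 1) = some 0 := by
    rw [pvBfind]
    simp only [Nat.cast_zero, add_zero, sub_zero, hrw, hc]
    simp [hs1]
  unfold check_pelindrome check_pelindrome_alt
  rw [pvAgo]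
  simp only [hfind, Nat.cast_zero, add_zero, sub_zero, hrw, hc, hta, htb]
  simp [hne, hs1]

-- main lemma: A's recursion computes B's value
lemma pvMain (tl : List Int) (rl : List (List (Option Int))) :
    ∀ fuel (s e : Int), 0 ≤ s → s ≤ e → e < (tl.length : Int) → e < (rl.length : Int) →
      (∀ i : Nat, s ≤ (i : Int) → (i : Int) ≤ e → e < ((rl.getD i []).length : Int)) →
      (e - s).toNat < fuel →
      pvAgo tl rl s e fuel = some (check_pelindrome_alt tl rl s e) := by
  intro fuel
  induction fuel with
  | zero => intro s e _ _ _ _ _ hf; omega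
  | succ f ih =>
    intro s e h0 hse ht hr hrow hf
    have hrow0 := hrow s.toNat (by omega) (by omega)
    rw [pvAgo]
    simp only [pvGet_getD rl s [] h0 (by omega),
      pvGet_getD (rl.getD s.toNat []) e none (by omega) (by omega)]
    rcases hc : (rl.getD s.toNat []).getD e.toNat none with _ | v
    · by_cases h1 : s = e
      · subst h1
        rw [if_pos rfl, alt_single tl rl s h0 (by omega) (by omega) hc]
      · rw [if_neg h1]
        by_cases h2 : s + 1 = e
        · subst h2
          rw [if_pos rfl,
              pvGet_getD tl s 0 h0 (by omega), pvGet_getD tl (s+1) 0 (by omega) ht,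
              alt_double tl rl s h0 ht hr (by omega) hc]
        · rw [if_neg h2]
          have hih := ih (s+1) (e-1) (by omega) (by omega) (by omega) (by omega)
            (fun i hi1 hi2 => by have := hrow i (by omega) (by omega); omega) (by omega)
          simp only [hih]
          rw [alt_step tl rl s e h0 (by omega) ht hr hrow hc]
          by_cases hL : check_pelindrome_alt tl rl (s+1) (e-1) = 0
          · simp [hL]
          · rw [if_neg hL, if_neg hL,
                pvGet_getD tl s 0 h0 (by omega), pvGet_getD tl e 0 (by omega) ht]
    · rw [alt_memo tl rl s e v h0 hse hr hrow0 hc]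

-- ===== VERDICT (by name: the statement is the Claim_ definition above) =====
theorem check_pelindrome_spec : Claim_equal_check_pelindrome := by
  intro tl rl start end_ _hdom hpre
  rcases hpre with ⟨h0, hse, ht, hr, hrow⟩ | ⟨hne, hcase⟩
  · unfold Spec_check_pelindrome check_pelindrome
    have hrow' : ∀ i : Nat, start ≤ (i : Int) → (i : Int) ≤ end_ → end_ < ((rl.getD i []).length : Int) := by
      intro i hi1 hi2
      exact hrow i (List.mem_range.mpr (by omega)) hi1 hi2
    rw [pvMain tl rl ((end_ - start).toNat + 1) start end_ h0 hse ht hr hrow' (by omega)]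
    rfl
  · unfold Spec_check_pelindrome
    rcases hrw : PySem.List.pyGet? rl start with _ | row
    · exact absurd (by unfold pvPeek; simp [hrw]) hne
    rcases hc : PySem.List.pyGet? row end_ with _ | c
    · exact absurd (by unfold pvPeek; simp [hrw, hc]) hne
    have hpk : pvPeek rl start end_ = some c := by unfold pvPeek; simp [hrw, hc]
    rcases c with _ | v
    · -- no memo value at (start, end_): must be a base case
      rcases hcase with hbad | hse | ⟨hs1, hta1, hta2, htb1, htb2⟩
      · exact absurd hpk hbad
      · subst hse
        exact stop_single tl rl start row hrw hc
      · have ha : ∃ a, PySem.List.pyGet? tl start = some a := by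
          rcases h : PySem.List.pyGet? tl start with _ | a
          · rw [PySem.List.pyGet?_eq_none_iff] at h
            exact absurd (by constructor <;> omega) h
          · exact ⟨a, rfl⟩
        have hb : ∃ b, PySem.List.pyGet? tl end_ = some b := by
          rcases h : PySem.List.pyGet? tl end_ with _ | b
          · rw [PySem.List.pyGet?_eq_none_iff] at h
            exact absurd (by constructor <;> omega) h
          · exact ⟨b, rfl⟩
        obtain ⟨a, ha⟩ := ha
        obtain ⟨b, hb⟩ := hb
        exact stop_double tl rl start end_ row a b hs1 hrw hc ha hb
    · exact stop_memo tl rl start end_ row v hrw hc
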